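-- pv_equiv track=rewrite | github.com/toshk15/LeetCode | NotEqualAveNeighbors.py | notEqualAve
-- ===== SOURCE A (Python) =====
-- def notEqualAve(arr):
--     arr.sort()
--     n = len(arr)
--     mid = (n+1)//2
--
--     res = []
--
--     for i in range(mid):
--         res.append(arr[i])
--
--         if i+mid < n:
--             res.append(arr[i+mid])
--     return res
-- ===== SOURCE B (Python) =====
-- def notEqualAve(arr):
--     arr.sort()
--     mid = (len(arr) + 1) // 2
--     lo = arr[:mid]
--     hi = arr[mid:]
--     lo.reverse()
--     hi.reverse()
--     res = []
--     while lo: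
--         res.append(lo.pop())
--         if hi:
--             res.append(hi.pop())
--     return res
-- ===== Notes on version B (the rewrite author's own statement) =====
-- stated objective: alternative
-- what changed: Replaces A's index loop over range(mid) with conditional indexed appends by slicing the sorted list into two reversed stacks and draining them alternately with pop() in a while loop, using no index arithmetic.
import Mathlib
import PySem

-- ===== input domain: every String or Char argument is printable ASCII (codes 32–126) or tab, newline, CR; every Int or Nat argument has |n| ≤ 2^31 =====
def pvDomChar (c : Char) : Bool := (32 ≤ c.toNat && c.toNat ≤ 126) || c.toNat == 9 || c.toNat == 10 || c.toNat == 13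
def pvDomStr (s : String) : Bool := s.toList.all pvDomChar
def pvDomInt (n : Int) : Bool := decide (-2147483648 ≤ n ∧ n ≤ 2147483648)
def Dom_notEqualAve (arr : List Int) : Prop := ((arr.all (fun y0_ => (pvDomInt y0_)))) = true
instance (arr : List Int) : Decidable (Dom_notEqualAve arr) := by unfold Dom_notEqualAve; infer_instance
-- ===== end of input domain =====

-- B replaces A's index loop over range(mid) (with conditional indexed appends) by slicing the sorted
-- list into two reversed stacks and draining them alternately with pop() (alternative decomposition, same cost).
-- Both Pythons sort arr in place; the equivalence proved here is about the RETURN value.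

-- ===== PORT A =====
def notEqualAve (arr : List Int) : List Int :=
  let s := PySem.List.sorted arr (fun x => x) false   -- arr.sort()
  let n : Int := s.length
  let mid : Int := PySem.Int.floordiv (n + 1) 2
  (PySem.List.pyRange 0 mid 1).foldl (fun res i =>
    let res := res ++ [PySem.List.pyGetD s i 0]       -- arr[i], index always in range
    if i + mid < n then res ++ [PySem.List.pyGetD s (i + mid) 0] else res) []

-- ===== PORT B =====
-- the while loop: while lo: res.append(lo.pop()); if hi: res.append(hi.pop())   (pop = getLast + dropLast)
def pvDrain (lo hi res : List Int) : List Int :=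
  if h : lo ≠ [] then
    let res := res ++ [lo.getLast h]
    if hh : hi ≠ [] then
      pvDrain lo.dropLast hi.dropLast (res ++ [hi.getLast hh])
    else
      pvDrain lo.dropLast hi res
  else res
termination_by lo.length
decreasing_by
  all_goals simp only [List.length_dropLast]
  all_goals have := List.length_pos_of_ne_nil h
  all_goals omega

def notEqualAve_alt (arr : List Int) : List Int :=
  let s := PySem.List.sorted arr (fun x => x) false             -- arr.sort()
  let mid : Int := PySem.Int.floordiv ((s.length : Int) + 1) 2
  let lo := (PySem.List.slice s none (some mid)).reverse        -- lo = arr[:mid]; lo.reverse()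
  let hi := (PySem.List.slice s (some mid) none).reverse        -- hi = arr[mid:]; hi.reverse()
  pvDrain lo hi []

-- ===== PRECONDITION & SPEC =====
def Spec_notEqualAve (arr : List Int) (out : List Int) : Prop := out = notEqualAve_alt arr
instance (arr : List Int) (out : List Int) : Decidable (Spec_notEqualAve arr out) := by unfold Spec_notEqualAve; infer_instance

-- ===== CLAIM (what is proved, stated in full; the proofs are below) =====
def Claim_equal_notEqualAve : Prop := ∀ (arr : List Int), Dom_notEqualAve arr → Spec_notEqualAve arr (notEqualAve arr)

-- ===== LEMMAS AND PROOFS =====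

-- the common normal form: position j of the answer holds s[j/2] (j even) or s[mid + j/2] (j odd)
def pvSpecAt (s : List Int) (j : Nat) : Int :=
  if j % 2 = 0 then s.getD (j / 2) 0 else s.getD ((s.length + 1) / 2 + j / 2) 0

def pvSpec (s : List Int) : List Int := (List.range s.length).map (pvSpecAt s)

lemma pvSpecAt_even (s : List Int) (k : Nat) : pvSpecAt s (2 * k) = s.getD k 0 := by
  unfold pvSpecAt; rw [if_pos (by omega)]; congr 1; omega

lemma pvSpecAt_odd (s : List Int) (k : Nat) :
    pvSpecAt s (2 * k + 1) = s.getD ((s.length + 1) / 2 + k) 0 := by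
  unfold pvSpecAt; rw [if_neg (by omega)]; congr 1; omega

-- ----- A-side: the gather fold is the flatMap of two-element (or final one-element) chunks -----

lemma gather_eq_spec (s : List Int) :
    ∀ (m k : Nat), k + m = (s.length + 1) / 2 →
      (List.range' k m).flatMap
          (fun i => s.getD i 0 ::
            (if i + (s.length + 1) / 2 < s.length then [s.getD (i + (s.length + 1) / 2) 0] else []))
        = (List.range' (2 * k) (s.length - 2 * k)).map (pvSpecAt s) := by
  intro m
  induction m with
  | zero =>
      intro k hk
      have h0 : s.length - 2 * k = 0 := by omega
      simp [h0]
  | succ m ih =>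
      intro k hk
      rw [List.range'_succ, List.flatMap_cons]
      by_cases hc : k + (s.length + 1) / 2 < s.length
      · have h2 : s.length - 2 * k = (s.length - 2 * (k + 1)) + 1 + 1 := by omega
        rw [h2, List.range'_succ, List.range'_succ, if_pos hc, ih (k + 1) (by omega)]
        simp only [List.map_cons, List.cons_append, List.nil_append]
        rw [pvSpecAt_even]
        have : 2 * k + 1 + 1 = 2 * (k + 1) := by omega
        rw [show (2 * k + 1) = 2 * k + 1 from rfl, pvSpecAt_odd, this]
        simp [Nat.add_comm]
      · have hm : m = 0 := by omega
        subst hm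
        have h1 : s.length - 2 * k = 1 := by omega
        rw [h1, List.range'_succ, if_neg hc]
        simp [pvSpecAt_even]

lemma foldl_eq_of_fun_eq {α β : Type} {f g : List α → β → List α}
    (h : ∀ res x, f res x = g res x) : ∀ (l : List β) (res : List α), l.foldl f res = l.foldl g res := by
  intro l
  induction l with
  | nil => intro res; rfl
  | cons x t ih => intro res; simp only [List.foldl_cons, h, ih]

lemma portA_eq_spec (arr : List Int) :
    notEqualAve arr = pvSpec (PySem.List.sorted arr (fun x => x) false) := by
  unfold notEqualAve
  set s := PySem.List.sorted arr (fun x => x) false with hs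
  have hmid : PySem.Int.floordiv ((s.length : Int) + 1) 2 = (((s.length + 1) / 2 : Nat) : Int) := by
    rw [show ((s.length : Int) + 1) = (((s.length + 1 : Nat)) : Int) by push_cast; ring]
    exact_mod_cast PySem.Int.floordiv_natCast (s.length + 1) 2
  simp only [hmid]
  rw [PySem.List.pyRange_one]
  rw [show (((((s.length + 1) / 2 : Nat)) : Int) - 0).toNat = (s.length + 1) / 2 by omega]
  rw [List.foldl_map]
  calc _ = (List.range ((s.length + 1) / 2)).foldl
            (fun (res : List Int) (k : Nat) => res ++ (s.getD k 0 ::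
              (if k + (s.length + 1) / 2 < s.length then [s.getD (k + (s.length + 1) / 2) 0] else []))) [] := by
        refine foldl_eq_of_fun_eq ?_ _ _
        intro res k
        simp only [zero_add]
        rw [show ((k : Int) + (((s.length + 1) / 2 : Nat) : Int)) = (((k + (s.length + 1) / 2 : Nat)) : Int) by push_cast; ring]
        simp only [PySem.List.pyGetD_natCast, Nat.cast_lt]
        by_cases hc : k + (s.length + 1) / 2 < s.length
        · rw [if_pos hc, if_pos hc]; simp
        · rw [if_neg hc, if_neg hc]
    _ = (List.range' 0 ((s.length + 1) / 2)).flatMap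
            (fun i => s.getD i 0 ::
              (if i + (s.length + 1) / 2 < s.length then [s.getD (i + (s.length + 1) / 2) 0] else [])) := by
        rw [PySem.List.foldl_append_eq_flatMap, List.nil_append, List.range_eq_range']
    _ = (List.range' (2 * 0) (s.length - 2 * 0)).map (pvSpecAt s) :=
        gather_eq_spec s ((s.length + 1) / 2) 0 (by omega)
    _ = pvSpec s := by unfold pvSpec; rw [List.range_eq_range']; norm_num

-- ----- B-side: the drain loop produces the weave of the two halves -----

-- proof-side normal form of the drain loop (on the un-reversed halves)
def pvWeave : List Int → List Int → List Int
  | [], _ => []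
  | a :: _, [] => [a]
  | a :: lo, b :: hi => a :: b :: pvWeave lo hi

lemma drain_rev : ∀ (A B res : List Int), B.length ≤ A.length → A.length ≤ B.length + 1 →
    pvDrain A.reverse B.reverse res = res ++ pvWeave A B := by
  intro A
  induction A with
  | nil =>
      intro B res h1 _
      have : B = [] := List.eq_nil_of_length_eq_zero (by simpa using h1)
      subst this
      rw [pvDrain]
      simp [pvWeave]
  | cons a A ih =>
      intro B res h1 h2
      cases B with
      | nil =>
          have hA : A = [] := List.eq_nil_of_length_eq_zero
            (by simp only [List.length_cons, List.length_nil] at h2; omega)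
          subst hA
          rw [pvDrain]
          simp only [List.reverse_cons, List.reverse_nil, List.nil_append]
          rw [dif_pos (by simp)]
          simp only [List.getLast_singleton, List.dropLast_singleton]
          rw [dif_neg (by simp)]
          rw [pvDrain]
          simp [pvWeave]
      | cons b B =>
          simp only [List.length_cons] at h1 h2
          rw [pvDrain]
          simp only [List.reverse_cons]
          rw [dif_pos (by simp), dif_pos (by simp)]
          simp only [List.getLast_concat, List.dropLast_concat]
          rw [ih B _ (by omega) (by omega)]
          simp [pvWeave]

-- the interleave of two lists by output index
def pvInter (lo hi : List Int) : List Int :=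
  (List.range (lo.length + hi.length)).map
    (fun j => if j % 2 = 0 then lo.getD (j / 2) 0 else hi.getD (j / 2) 0)

lemma pvInter_cons (a b : Int) (lo hi : List Int) :
    pvInter (a :: lo) (b :: hi) = a :: b :: pvInter lo hi := by
  unfold pvInter
  have hlen : (a :: lo).length + (b :: hi).length = (lo.length + hi.length) + 1 + 1 := by
    simp; omega
  rw [hlen, List.range_succ_eq_map, List.range_succ_eq_map]
  simp only [List.map_cons, List.map_map]
  refine congrArg₂ _ (by norm_num) (congrArg₂ _ (by norm_num) ?_)
  refine List.map_congr_left ?_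
  intro j _
  simp only [Function.comp]
  have hp : (j + 1 + 1) % 2 = j % 2 := by omega
  have hd : (j + 1 + 1) / 2 = j / 2 + 1 := by omega
  rw [hp, hd]
  by_cases h : j % 2 = 0
  · rw [if_pos h, if_pos h, List.getD_cons_succ]
  · rw [if_neg h, if_neg h, List.getD_cons_succ]

lemma pvWeave_eq_pvInter :
    ∀ (lo hi : List Int), hi.length ≤ lo.length → lo.length ≤ hi.length + 1 →
      pvWeave lo hi = pvInter lo hi := by
  intro lo
  induction lo with
  | nil =>
      intro hi h1 _
      have : hi = [] := List.eq_nil_of_length_eq_zero (by simpa using h1)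
      subst this; rfl
  | cons a lo ih =>
      intro hi h1 h2
      cases hi with
      | nil =>
          have : lo = [] := List.eq_nil_of_length_eq_zero (by simp only [List.length_cons, List.length_nil] at h2; omega)
          subst this
          simp [pvWeave, pvInter]
      | cons b hi =>
          show a :: b :: pvWeave lo hi = _
          rw [pvInter_cons, ih hi (by simp at h1; omega) (by simp at h2; omega)]

lemma pvInter_halves (s : List Int) :
    pvInter (s.take ((s.length + 1) / 2)) (s.drop ((s.length + 1) / 2)) = pvSpec s := by
  unfold pvInter pvSpec
  have hm : (s.length + 1) / 2 ≤ s.length := by omega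
  have hlen : (s.take ((s.length + 1) / 2)).length + (s.drop ((s.length + 1) / 2)).length
      = s.length := by simp; omega
  rw [hlen]
  refine List.map_congr_left ?_
  intro j hj
  rw [List.mem_range] at hj
  unfold pvSpecAt
  by_cases h : j % 2 = 0
  · rw [if_pos h, if_pos h]
    have hk : j / 2 < (s.length + 1) / 2 := by omega
    rw [List.getD_eq_getElem?_getD, List.getD_eq_getElem?_getD, List.getElem?_take_of_lt hk]
  · rw [if_neg h, if_neg h]
    rw [List.getD_eq_getElem?_getD, List.getD_eq_getElem?_getD, List.getElem?_drop]
  -- closes both goals above; drop shifts indices by (s.length+1)/2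

lemma portB_eq_spec (arr : List Int) :
    notEqualAve_alt arr = pvSpec (PySem.List.sorted arr (fun x => x) false) := by
  unfold notEqualAve_alt
  set s := PySem.List.sorted arr (fun x => x) false with hs
  have hmid : PySem.Int.floordiv ((s.length : Int) + 1) 2 = (((s.length + 1) / 2 : Nat) : Int) := by
    rw [show ((s.length : Int) + 1) = (((s.length + 1 : Nat)) : Int) by push_cast; ring]
    exact_mod_cast PySem.Int.floordiv_natCast (s.length + 1) 2
  simp only [hmid]
  rw [PySem.List.slice_to_natCast, PySem.List.slice_from_natCast]
  rw [drain_rev _ _ _ (by simp; omega) (by simp; omega), List.nil_append]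
  rw [pvWeave_eq_pvInter _ _ (by simp; omega) (by simp; omega)]
  exact pvInter_halves s

-- ===== VERDICT (by name: the statement is the Claim_ definition above) =====
theorem notEqualAve_spec : Claim_equal_notEqualAve := by
  intro arr _
  unfold Spec_notEqualAve
  rw [portA_eq_spec, portB_eq_spec]
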